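-- pv_equiv track=rewrite | github.com/SmashingBumpkin/Python | HW7opt/program01.py | remove_int_variations2
-- ===== SOURCE A (Python) =====
-- def remove_all(l, num):
--     try:
--         l.remove(num)
--         return remove_all(l,num)
--     except:
--         return l
--
-- def remove_int_variations2(lst, c):
--     if lst.count(c) == 1:
--         return [lst]
--
--     output = []
--
--     for i, num in enumerate(lst):
--         if num == c:
--             lst[i] = 'z'
--             newL = remove_all(lst[:i],c)
--             newL.append(c)
--             newL.extend(remove_all(lst[i+1:],c))
--             lst[i] = c
--             output.append(newL)
--
--     return output
-- ===== SOURCE B (Python) =====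
-- def remove_int_variations2(lst, c):
--     # The c-free base is computed once; each occurrence of c contributes the
--     # base with a single c inserted at the running count of non-c elements.
--     base = [x for x in lst if x != c]
--     output = []
--     pos = 0
--     for x in lst:
--         if x == c:
--             output.append(base[:pos] + [c] + base[pos:])
--         else:
--             pos += 1
--     return output
-- ===== Notes on version B (the rewrite author's own statement) =====
-- stated objective: alternative
-- what changed: B computes the c-free base list once and, in a single pass with a running non-c counter, inserts one c per occurrence, instead of A's per-occurrence recursive remove_all over both slices.
import Mathlib
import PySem

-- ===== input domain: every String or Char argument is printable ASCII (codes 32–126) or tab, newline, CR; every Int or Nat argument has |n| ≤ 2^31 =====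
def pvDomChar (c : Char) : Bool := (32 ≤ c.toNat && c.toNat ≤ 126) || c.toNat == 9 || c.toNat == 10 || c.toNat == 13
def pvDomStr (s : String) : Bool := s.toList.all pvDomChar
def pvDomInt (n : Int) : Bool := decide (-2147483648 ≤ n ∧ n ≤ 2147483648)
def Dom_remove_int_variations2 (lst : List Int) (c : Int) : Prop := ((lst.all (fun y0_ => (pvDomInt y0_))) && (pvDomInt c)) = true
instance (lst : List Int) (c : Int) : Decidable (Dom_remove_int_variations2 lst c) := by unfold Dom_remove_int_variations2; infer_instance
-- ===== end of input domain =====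

-- B precomputes the c-removed base once and inserts a single c at the running
-- non-c count per occurrence, instead of A's per-occurrence recursive remove_all
-- over both slices; equivalence is about the RETURN value only: A briefly
-- writes lst[i] = 'z' and restores it (net mutation none), and when the count
-- is 1 A returns the argument list itself while B returns an equal fresh list.

-- ===== PORT A =====
-- remove_all: recursion on list.remove (remove? = none is Python's ValueError, caught by `except`)
def removeAll (l : List Int) (num : Int) : List Int :=
  match h : PySem.List.remove? l num with
  | some l' => removeAll l' num
  | none => l
termination_by l.length
decreasing_by
  have hm : num ∈ l := by
    by_contra hn
    simp [(PySem.List.remove?_eq_none_iff l num).mpr hn] at h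
  have he : l' = l.erase num :=
    Option.some_inj.mp (h.symm.trans (PySem.List.remove?_eq_some_erase l num hm))
  have hlen := List.length_erase_of_mem hm
  have hpos : 0 < l.length := List.length_pos_of_mem hm
  subst he
  omega

-- the temporary lst[i] = 'z' assignment is restored each iteration and the two
-- slices exclude index i, so the fold reads the original lst throughout
def remove_int_variations2 (lst : List Int) (c : Int) : List (List Int) :=
  if PySem.List.count lst c = 1 then [lst]
  else
    (PySem.List.enumerate lst).foldl
      (fun output p =>
        if p.2 = c then
          output ++ [(removeAll (PySem.List.slice lst none (some p.1)) c ++ [c]) ++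
                     removeAll (PySem.List.slice lst (some (p.1 + 1)) none) c]
        else output) []

-- ===== PORT B =====
-- base[:pos] / base[pos:] with pos a running Nat are exactly take/drop
def remove_int_variations2_alt (lst : List Int) (c : Int) : List (List Int) :=
  let base := lst.filter (fun x => x != c)
  (lst.foldl
    (fun st x =>
      if x = c then (st.1 ++ [(base.take st.2 ++ [c]) ++ base.drop st.2], st.2)
      else (st.1, st.2 + 1))
    (([] : List (List Int)), (0 : Nat))).1

-- ===== PRECONDITION & SPEC =====
def Spec_remove_int_variations2 (lst : List Int) (c : Int) (out : List (List Int)) : Prop := out = remove_int_variations2_alt lst c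
instance (lst : List Int) (c : Int) (out : List (List Int)) : Decidable (Spec_remove_int_variations2 lst c out) := by unfold Spec_remove_int_variations2; infer_instance

-- ===== CLAIM (what is proved, stated in full; the proofs are below) =====
def Claim_equal_remove_int_variations2 : Prop := ∀ (lst : List Int) (c : Int), Dom_remove_int_variations2 lst c → Spec_remove_int_variations2 lst c (remove_int_variations2 lst c)

-- ===== LEMMAS AND PROOFS =====

theorem removeAll_some_erase {l l' : List Int} {num : Int}
    (h : PySem.List.remove? l num = some l') : num ∈ l ∧ l' = l.erase num := by
  have hm : num ∈ l := by
    by_contra hn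
    rw [(PySem.List.remove?_eq_none_iff l num).mpr hn] at h
    simp at h
  refine ⟨hm, ?_⟩
  have h2 := h.symm.trans (PySem.List.remove?_eq_some_erase l num hm)
  exact Option.some_inj.mp h2

theorem filter_ne_erase (c : Int) (l : List Int) :
    (l.erase c).filter (fun x => x != c) = l.filter (fun x => x != c) := by
  induction l with
  | nil => simp
  | cons x xs ih =>
    by_cases hx : x = c
    · subst hx; simp [List.erase_cons_head]
    · rw [List.erase_cons_tail (by simpa using hx)]
      simp [hx, ih]

theorem removeAll_eq_filter (l : List Int) (num : Int) :
    removeAll l num = l.filter (fun x => x != num) := by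
  suffices H : ∀ (n : Nat) (l : List Int), l.length = n →
      removeAll l num = l.filter (fun x => x != num) from H l.length l rfl
  intro n
  induction n using Nat.strong_induction_on with
  | _ n ih =>
    intro l hl
    unfold removeAll
    split
    · rename_i l' h
      obtain ⟨hm, he⟩ := removeAll_some_erase h
      subst he
      have hlt : (l.erase num).length < n := by
        have := List.length_erase_of_mem hm
        have hpos : 0 < l.length := List.length_pos_of_mem hm
        omega
      rw [ih _ hlt _ rfl, filter_ne_erase]
    · rename_i h
      have hn : num ∉ l := (PySem.List.remove?_eq_none_iff l num).mp h
      exact (List.filter_eq_self.mpr (fun x hx => by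
        simp only [bne_iff_ne, ne_eq]
        exact fun e => hn (e ▸ hx))).symm

theorem alt_fold_zero (c : Int) (base : List Int) (xs : List Int)
    (out : List (List Int)) (pos : Nat) :
    c ∉ xs →
    (xs.foldl
      (fun st x =>
        if x = c then (st.1 ++ [(base.take st.2 ++ [c]) ++ base.drop st.2], st.2)
        else (st.1, st.2 + 1)) (out, pos)).1 = out := by
  induction xs generalizing out pos with
  | nil => intro _; rfl
  | cons x xs ih =>
    intro h
    have hx : x ≠ c := fun e => h (e ▸ List.mem_cons_self)
    simp only [List.foldl_cons, if_neg hx]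
    exact ih _ _ (fun hm => h (List.mem_cons_of_mem _ hm))

theorem alt_fold_one (c : Int) (base : List Int) (xs : List Int)
    (out : List (List Int)) (pre : List Int) :
    c ∉ pre → base = pre ++ xs.filter (fun x => x != c) →
    PySem.List.count xs c = 1 →
    (xs.foldl
      (fun st x =>
        if x = c then (st.1 ++ [(base.take st.2 ++ [c]) ++ base.drop st.2], st.2)
        else (st.1, st.2 + 1)) (out, pre.length)).1 = out ++ [pre ++ xs] := by
  induction xs generalizing out pre with
  | nil => intro _ _ hcnt; simp [PySem.List.count] at hcnt
  | cons x xs ih =>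
    intro hpre hbase hcnt
    by_cases hx : x = c
    · subst hx
      have hx0 : PySem.List.count xs x = 0 := by
        simp [PySem.List.count] at hcnt ⊢
        omega
      have hnot : x ∉ xs := by
        simpa [PySem.List.count] using (List.count_eq_zero.mp (by simpa [PySem.List.count] using hx0))
      have hfx : xs.filter (fun y => y != x) = xs :=
        List.filter_eq_self.mpr (fun y hy => by
          simp only [bne_iff_ne, ne_eq]
          exact fun e => hnot (e ▸ hy))
      have hb : base = pre ++ xs := by
        simpa [List.filter_cons, hfx] using hbase
      simp only [List.foldl_cons]
      rw [alt_fold_zero _ _ _ _ _ hnot, hb]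
      rw [List.take_left' rfl, List.drop_left' rfl]
      simp
    · simp only [List.foldl_cons, if_neg hx]
      have hlen : (pre ++ [x]).length = pre.length + 1 := by simp
      rw [← hlen]
      rw [ih out (pre ++ [x])
        (by simp only [List.mem_append, List.mem_singleton]
            rintro (h1 | h2); exact hpre h1; exact hx h2.symm)
        (by simpa [hx] using hbase)
        (by simpa [PySem.List.count, List.count_cons, hx] using hcnt)]
      simp

theorem key_fold (lst : List Int) (c : Int) (ys : List Int) (k : Nat)
    (out : List (List Int)) :
    lst.drop k = ys →
    ((PySem.List.enumerate ys (k : Int)).foldl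
      (fun output p =>
        if p.2 = c then
          output ++ [(removeAll (PySem.List.slice lst none (some p.1)) c ++ [c]) ++
                     removeAll (PySem.List.slice lst (some (p.1 + 1)) none) c]
        else output) out)
      =
    (ys.foldl
      (fun st x =>
        if x = c then
          (st.1 ++ [((lst.filter (fun x => x != c)).take st.2 ++ [c]) ++
                    (lst.filter (fun x => x != c)).drop st.2], st.2)
        else (st.1, st.2 + 1))
      (out, ((lst.take k).filter (fun x => x != c)).length)).1 := by
  induction ys generalizing k out with
  | nil => intro _; simp [PySem.List.enumerate_nil]
  | cons x xs ih =>
    intro hk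
    have hklt : k < lst.length := by
      by_contra hge
      rw [List.drop_eq_nil_of_le (by omega)] at hk
      simp at hk
    have hcons : lst[k]'hklt :: lst.drop (k + 1) = x :: xs := by
      rw [← List.drop_eq_getElem_cons hklt, hk]
    have hget : lst[k]'hklt = x := (List.cons_eq_cons.mp hcons).1
    have hdrop1 : lst.drop (k + 1) = xs := (List.cons_eq_cons.mp hcons).2
    have htake1 : lst.take (k + 1) = lst.take k ++ [x] := by
      rw [List.take_add_one]
      simp [List.getElem?_eq_getElem hklt, hget]
    have hc1 : ((k : Int) + 1) = ((k + 1 : Nat) : Int) := by push_cast; ring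
    rw [PySem.List.enumerate_cons]
    simp only [List.foldl_cons]
    by_cases hx : x = c
    · subst hx
      have hsl1 : PySem.List.slice lst none (some (k : Int)) = lst.take k :=
        PySem.List.slice_to_natCast lst k
      have hsl2 : PySem.List.slice lst (some ((k : Int) + 1)) none = lst.drop (k + 1) := by
        rw [hc1]; exact PySem.List.slice_from_natCast lst (k + 1)
      have hsplit : lst.filter (fun y => y != x) =
          (lst.take k).filter (fun y => y != x) ++ (lst.drop (k+1)).filter (fun y => y != x) := by
        conv_lhs => rw [← List.take_append_drop k lst]
        rw [List.filter_append]
        congr 1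
        have hd : lst.drop k = x :: lst.drop (k+1) := by rw [hk, hdrop1]
        rw [hd, List.filter_cons]
        simp
      have htk : (lst.filter (fun y => y != x)).take (((lst.take k).filter (fun y => y != x)).length)
          = (lst.take k).filter (fun y => y != x) := by
        rw [hsplit, List.take_left' rfl]
      have hdk : (lst.filter (fun y => y != x)).drop (((lst.take k).filter (fun y => y != x)).length)
          = (lst.drop (k+1)).filter (fun y => y != x) := by
        rw [hsplit, List.drop_left' rfl]
      rw [hsl1, hsl2, removeAll_eq_filter, removeAll_eq_filter, htk, hdk]
      have hlen : ((lst.take (k+1)).filter (fun y => y != x)).length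
          = ((lst.take k).filter (fun y => y != x)).length := by
        rw [htake1, List.filter_append]; simp
      have := ih (k + 1)
        (out ++ [((lst.take k).filter (fun y => y != x) ++ [x]) ++
                 (lst.drop (k + 1)).filter (fun y => y != x)])
        hdrop1
      rw [hlen] at this
      rw [hc1]
      simp only [if_true]
      exact this
    · simp only [if_neg hx]
      have hlen : ((lst.take (k+1)).filter (fun y => y != c)).length
          = ((lst.take k).filter (fun y => y != c)).length + 1 := by
        rw [htake1, List.filter_append]
        simp [hx]
      have := ih (k + 1) out hdrop1
      rw [hlen] at this
      rw [hc1]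
      exact this

-- ===== VERDICT (by name: the statement is the Claim_ definition above) =====
theorem remove_int_variations2_spec : Claim_equal_remove_int_variations2 := by
  intro lst c _
  unfold Spec_remove_int_variations2
  rw [show remove_int_variations2_alt lst c =
      (lst.foldl
        (fun st x =>
          if x = c then
            (st.1 ++ [((lst.filter (fun x => x != c)).take st.2 ++ [c]) ++
                      (lst.filter (fun x => x != c)).drop st.2], st.2)
          else (st.1, st.2 + 1))
        (([] : List (List Int)), (0 : Nat))).1 from rfl]
  unfold remove_int_variations2
  by_cases h1 : PySem.List.count lst c = 1
  · rw [if_pos h1]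
    have := alt_fold_one c (lst.filter (fun x => x != c)) lst [] [] (by simp) (by simp) h1
    simpa using this.symm
  · rw [if_neg h1]
    have := key_fold lst c lst 0 [] (by simp)
    simpa using this
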